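-- pv_equiv track=rewrite | github.com/chrisRduckworth/everybody-codes | 2024/quest_1.py | part_2
-- ===== SOURCE A (Python) =====
-- def part_2(monsters):
--     potions_per_monster = {"A": 0, "B": 1, "C": 3, "D": 5, "x": 0}
--     pairs = [monsters[2*i:2*i+2] for i in range(len(monsters)//2)]
--     total_potions = 0
--     for p in pairs:
--         potions = 0
--         if "x" not in p:
--             potions += 2
--         potions += potions_per_monster[p[0]] + potions_per_monster[p[1]]
--         total_potions += potions
--     return total_potions
-- ===== SOURCE B (Python) =====
-- def part_2(monsters):
--     potions_per_monster = {"A": 0, "B": 1, "C": 3, "D": 5, "x": 0}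
--     k = len(monsters) // 2
--     total = 0
--     x_pairs = set()
--     for i, c in enumerate(monsters[:2*k]):
--         total += potions_per_monster[c]
--         if c == "x":
--             x_pairs.add(i // 2)
--     return total + 2 * (k - len(x_pairs))
-- ===== Notes on version B (the rewrite author's own statement) =====
-- stated objective: alternative
-- what changed: Instead of slicing the string into pairs and scoring each pair, B makes one character-level enumerate pass that sums potion values and collects the set of pair indices i//2 at which an 'x' occurs, then computes the bonus as 2*(k - |x_pairs|).
import Mathlib
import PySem

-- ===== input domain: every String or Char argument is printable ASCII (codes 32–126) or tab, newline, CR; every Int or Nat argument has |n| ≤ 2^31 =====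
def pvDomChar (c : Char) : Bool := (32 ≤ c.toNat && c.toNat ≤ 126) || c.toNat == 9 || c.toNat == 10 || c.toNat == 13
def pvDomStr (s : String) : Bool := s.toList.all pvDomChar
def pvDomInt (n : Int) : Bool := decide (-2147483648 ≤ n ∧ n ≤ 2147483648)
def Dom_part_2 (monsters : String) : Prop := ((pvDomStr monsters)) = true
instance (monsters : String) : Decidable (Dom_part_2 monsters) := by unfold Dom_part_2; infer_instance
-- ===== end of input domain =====

-- B replaces A's pair-slicing loop by a single character-level enumerate pass that sums potion
-- values and collects the SET of pair indices i//2 holding an 'x'; bonus = 2*(k - |x_pairs|).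
-- Objective: alternative decomposition, same cost.

-- ===== PORT A =====
-- A's dict {"A":0,"B":1,"C":3,"D":5,"x":0}; any other key raises KeyError in Python, excluded by
-- Pre_part_2, so the final `else 0` arm is never reached on admitted inputs.
def pvPotionsA (c : Char) : Int :=
  if c = 'A' then 0 else if c = 'B' then 1 else if c = 'C' then 3
  else if c = 'D' then 5 else if c = 'x' then 0 else 0

-- Python slice monsters[2*i:2*i+2] with these nonnegative indices is exactly drop-then-take;
-- p[0]/p[1] always exist (every pair has length 2 since i < len//2), so getD's default is unused.
def part_2 (monsters : String) : Int :=
  let cs := monsters.toList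
  let pairs := (List.range (cs.length / 2)).map (fun i => (cs.drop (2*i)).take 2)
  pairs.foldl (fun total p =>
    total + ((if 'x' ∈ p then (0:Int) else 2)
             + (pvPotionsA (p.getD 0 'x') + pvPotionsA (p.getD 1 'x')))) 0

-- ===== PORT B =====
-- same dict as in Source B; unknown keys (KeyError) are excluded by Pre_part_2
def pvPotionsB (c : Char) : Int :=
  if c = 'A' then 0 else if c = 'B' then 1 else if c = 'C' then 3
  else if c = 'D' then 5 else if c = 'x' then 0 else 0

-- monsters[:2*k] = take (2*k); `for i, c in enumerate(...)` = foldl over PySem.List.enumerate;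
-- x_pairs is a PySem.Set; i//2 = PySem.Int.floordiv i 2; len(x_pairs) = PySem.Set.len.
def part_2_alt (monsters : String) : Int :=
  let cs := monsters.toList
  let k := cs.length / 2
  let st := (PySem.List.enumerate (cs.take (2*k)) 0).foldl
    (fun (st : Int × PySem.Set Int) ic =>
      (st.1 + pvPotionsB ic.2,
       if ic.2 = 'x' then PySem.Set.add st.2 (PySem.Int.floordiv ic.1 2) else st.2))
    (0, PySem.Set.empty)
  st.1 + 2 * ((k : Int) - PySem.Set.len st.2)

-- ===== PRECONDITION & SPEC =====
-- Pre_ admits exactly the inputs A returns on: every character of the paired prefix must be a key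
-- of the potion dict, otherwise Python A raises KeyError.
def Pre_part_2 (monsters : String) : Prop :=
  ((monsters.toList.take (2 * (monsters.toList.length / 2))).all
    (fun c => (['A', 'B', 'C', 'D', 'x'] : List Char).contains c)) = true
instance (monsters : String) : Decidable (Pre_part_2 monsters) := by
  unfold Pre_part_2; infer_instance

def pvWitness_part_2 : String := "ABxDC"

def Spec_part_2 (monsters : String) (out : Int) : Prop := out = part_2_alt monsters
instance (monsters : String) (out : Int) : Decidable (Spec_part_2 monsters out) := by
  unfold Spec_part_2; infer_instance

-- ===== CLAIM (what is proved, stated in full; the proofs are below) =====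
def Claim_equal_part_2 : Prop := ∀ (monsters : String),
  Dom_part_2 monsters → Pre_part_2 monsters → Spec_part_2 monsters (part_2 monsters)

-- ===== LEMMAS AND PROOFS =====

-- A's per-pair summand
def pvG (p : List Char) : Int :=
  (if 'x' ∈ p then (0:Int) else 2) + (pvPotionsA (p.getD 0 'x') + pvPotionsA (p.getD 1 'x'))

-- list-level body of port A
def pvA (cs : List Char) : Int :=
  ((List.range (cs.length / 2)).map (fun i => pvG ((cs.drop (2*i)).take 2))).sum

-- count of pairs containing an 'x'
def pvCnt (cs : List Char) : Int :=
  ((List.range (cs.length / 2)).map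
    (fun i => if 'x' ∈ (cs.drop (2*i)).take 2 then (1:Int) else 0)).sum

-- B's loop step, on lists
def pvStep (st : Int × PySem.Set Int) (ic : Int × Char) : Int × PySem.Set Int :=
  (st.1 + pvPotionsB ic.2,
   if ic.2 = 'x' then PySem.Set.add st.2 (PySem.Int.floordiv ic.1 2) else st.2)

theorem part_2_eq_pvA (m : String) : part_2 m = pvA m.toList := by
  unfold part_2 pvA pvG
  rw [PySem.List.foldl_add, List.map_map, zero_add]
  rfl

-- prepending one full pair shifts the slice-indexed sum by one pair
theorem pv_range_step (f : List Char → Int) (a b : Char) (rest : List Char) :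
    ((List.range ((a::b::rest).length / 2)).map
        (fun i => f (((a::b::rest).drop (2*i)).take 2))).sum
      = f [a, b] + ((List.range (rest.length / 2)).map
        (fun i => f ((rest.drop (2*i)).take 2))).sum := by
  have h : (a::b::rest).length / 2 = rest.length / 2 + 1 := by
    simp [List.length_cons]; omega
  rw [h, List.range_succ_eq_map, List.map_cons, List.sum_cons, List.map_map]
  have h3 : ∀ i : Nat, ((a::b::rest).drop (2*(i+1))).take 2 = (rest.drop (2*i)).take 2 := by
    intro i
    have h2 : 2 * (i + 1) = (2*i + 1) + 1 := by omega
    rw [h2]; simp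
  simp [Function.comp_def, Nat.succ_eq_add_one, h3]

theorem pv_fdiv_even (m : Nat) : PySem.Int.floordiv (2*(m:Int)) 2 = (m:Int) := by
  simp [PySem.Int.floordiv, Int.mul_fdiv_cancel_left]

theorem pv_fdiv_odd (m : Nat) : PySem.Int.floordiv (2*(m:Int)+1) 2 = (m:Int) := by
  have : (2*(m:Int)+1) = 1 + (m:Int)*2 := by ring
  simp [PySem.Int.floordiv, this, Int.add_mul_fdiv_right]

-- invariant of B's fold over a fully paired suffix starting at character index 2*m
theorem pvFold (l : List Char) (m : Nat) (t : Int) (S : PySem.Set Int)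
    (hS : S.Nodup) (hlt : ∀ z ∈ S, z < (m:Int)) (hev : l.length % 2 = 0) :
    ((PySem.List.enumerate l (2*(m:Int))).foldl pvStep (t, S)).1
        = t + (l.map pvPotionsB).sum
    ∧ (((PySem.List.enumerate l (2*(m:Int))).foldl pvStep (t, S)).2.length : Int)
        = S.length + pvCnt l := by
  match l with
  | [] => simp [PySem.List.enumerate, pvCnt]
  | [a] => simp at hev
  | a :: b :: rest =>
    have hm : m < m + 1 := Nat.lt_succ_self m
    have hmem : (m:Int) ∉ S := fun h => absurd (hlt _ h) (by omega)
    -- unfold two enumerate steps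
    have e2 : (2*(m:Int)+1)+1 = 2*((m+1 : Nat):Int) := by push_cast; ring
    have henum : PySem.List.enumerate (a :: b :: rest) (2*(m:Int))
        = (2*(m:Int), a) :: (2*(m:Int)+1, b) :: PySem.List.enumerate rest (2*((m+1 : Nat):Int)) := by
      rw [PySem.List.enumerate_cons, PySem.List.enumerate_cons, e2]
    -- the state after the two steps
    set S' : PySem.Set Int :=
      (if b = 'x'
        then PySem.Set.add (if a = 'x' then PySem.Set.add S (m:Int) else S) (m:Int)
        else (if a = 'x' then PySem.Set.add S (m:Int) else S)) with hS'def
    have hstep2 : (PySem.List.enumerate (a :: b :: rest) (2*(m:Int))).foldl pvStep (t, S)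
        = (PySem.List.enumerate rest (2*((m+1 : Nat):Int))).foldl pvStep
            (t + pvPotionsB a + pvPotionsB b, S') := by
      rw [henum, List.foldl_cons, List.foldl_cons]
      simp only [pvStep, pv_fdiv_even, pv_fdiv_odd, hS'def]
    have hS'cases : (S' = S ∧ ¬ ('x' ∈ ([a,b] : List Char)))
        ∨ (S' = S ++ [(m:Int)] ∧ 'x' ∈ ([a,b] : List Char)) := by
      by_cases ha : a = 'x' <;> by_cases hb : b = 'x' <;>
        simp [hS'def, ha, hb, eq_comm, PySem.Set.add_of_not_mem hmem]
    have hS'nodup : S'.Nodup := by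
      rcases hS'cases with ⟨h, _⟩ | ⟨h, _⟩
      · rw [h]; exact hS
      · rw [h]; exact List.nodup_append.mpr ⟨hS, List.nodup_singleton _, by
          intro z hz; simp; intro hzm; exact absurd (hlt _ hz) (by rw [hzm]; omega)⟩
    have hS'lt : ∀ z ∈ S', z < (((m+1 : Nat)):Int) := by
      intro z hz
      rcases hS'cases with ⟨h, _⟩ | ⟨h, _⟩
      · rw [h] at hz; have := hlt _ hz; push_cast; omega
      · rw [h] at hz; rcases List.mem_append.mp hz with h1 | h1
        · have := hlt _ h1; push_cast; omega
        · simp at h1; rw [h1]; push_cast; omega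
    have hevr : rest.length % 2 = 0 := by simp [List.length_cons] at hev; omega
    have ih := pvFold rest (m+1) (t + pvPotionsB a + pvPotionsB b) S' hS'nodup hS'lt hevr
    constructor
    · rw [hstep2, ih.1]; simp; ring
    · rw [hstep2, ih.2]
      have hcnt : pvCnt (a :: b :: rest)
          = (if 'x' ∈ ([a,b] : List Char) then (1:Int) else 0) + pvCnt rest := by
        unfold pvCnt
        exact pv_range_step (fun p => if 'x' ∈ p then (1:Int) else 0) a b rest
      rw [hcnt]
      rcases hS'cases with ⟨h, hx⟩ | ⟨h, hx⟩ <;> simp [h, hx] <;> ring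
termination_by l.length

-- the paired prefix of a list starting with a full pair
theorem pv_take_step (a b : Char) (rest : List Char) :
    (a::b::rest).take (2 * ((a::b::rest).length / 2))
      = a :: b :: rest.take (2 * (rest.length / 2)) := by
  have h : (a::b::rest).length / 2 = rest.length / 2 + 1 := by
    simp [List.length_cons]; omega
  have h2 : 2 * (rest.length / 2 + 1) = (2 * (rest.length / 2) + 1) + 1 := by omega
  rw [h, h2]
  simp

-- A's result as character sum + 2*(k - #x-pairs)
theorem pvA_char (cs : List Char) :
    pvA cs = ((cs.take (2 * (cs.length / 2))).map pvPotionsB).sum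
      + 2 * (((cs.length / 2 : Nat) : Int) - pvCnt cs) := by
  match cs with
  | [] => simp [pvA, pvCnt]
  | [a] => simp [pvA, pvCnt]
  | a :: b :: rest =>
    have ih := pvA_char rest
    have h : (a::b::rest).length / 2 = rest.length / 2 + 1 := by
      simp [List.length_cons]; omega
    have hcnt : pvCnt (a :: b :: rest)
        = (if 'x' ∈ ([a,b] : List Char) then (1:Int) else 0) + pvCnt rest := by
      unfold pvCnt
      exact pv_range_step (fun p => if 'x' ∈ p then (1:Int) else 0) a b rest
    have hA : pvA (a :: b :: rest) = pvG [a, b] + pvA rest := by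
      unfold pvA
      exact pv_range_step pvG a b rest
    rw [hA, hcnt, pv_take_step, List.map_cons, List.map_cons, List.sum_cons, List.sum_cons,
        ih, h]
    have hg : pvG [a, b]
        = (if 'x' ∈ ([a, b] : List Char) then (0:Int) else 2) + (pvPotionsA a + pvPotionsA b) := by
      simp [pvG]
    have hB : ∀ c, pvPotionsB c = pvPotionsA c := fun _ => rfl
    rw [hg, hB a, hB b]
    push_cast
    split_ifs <;> ring
termination_by cs.length

-- slicing a pair out of the paired prefix is the same as slicing it out of the whole list
theorem pv_cnt_take (cs : List Char) :
    pvCnt (cs.take (2 * (cs.length / 2))) = pvCnt cs := by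
  unfold pvCnt
  have hl : (cs.take (2 * (cs.length / 2))).length / 2 = cs.length / 2 := by
    simp [List.length_take]; omega
  rw [hl]
  congr 1
  apply List.map_congr_left
  intro i hi
  simp only [List.mem_range] at hi
  rw [List.drop_take, List.take_take,
    show min 2 (2 * (cs.length / 2) - 2 * i) = 2 by omega]

-- B's port, expressed through the fold invariant
theorem part_2_alt_char (ms : String) :
    part_2_alt ms = ((ms.toList.take (2 * (ms.toList.length / 2))).map pvPotionsB).sum
      + 2 * (((ms.toList.length / 2 : Nat) : Int) - pvCnt ms.toList) := by
  have hev : (ms.toList.take (2 * (ms.toList.length / 2))).length % 2 = 0 := by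
    simp [List.length_take]; omega
  have hfold := pvFold (ms.toList.take (2 * (ms.toList.length / 2))) 0 0
      PySem.Set.empty (by simp [PySem.Set.empty]) (by simp [PySem.Set.empty]) hev
  simp only [Nat.cast_zero, mul_zero, zero_add, PySem.Set.empty, List.length_nil] at hfold
  show (((PySem.List.enumerate (ms.toList.take (2 * (ms.toList.length / 2))) 0).foldl
          pvStep (0, PySem.Set.empty)).1
      + 2 * (((ms.toList.length / 2 : Nat) : Int)
          - PySem.Set.len ((PySem.List.enumerate (ms.toList.take (2 * (ms.toList.length / 2))) 0).foldl
              pvStep (0, PySem.Set.empty)).2)) = _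
  simp only [PySem.Set.len, PySem.Set.empty] at *
  rw [hfold.1, hfold.2, pv_cnt_take]

-- ===== VERDICT (by name: the statement is the Claim_ definition above) =====
theorem part_2_spec : Claim_equal_part_2 := by
  intro monsters _ _
  unfold Spec_part_2
  rw [part_2_eq_pvA, pvA_char, part_2_alt_char]
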